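-- pv_equiv track=rewrite | github.com/ai-scm/cat-normalize | infrastructure/lambda/feedback-processor/feedback_analysis.py | get_user_and_bot_messages
-- ===== SOURCE A (Python) =====
-- from typing import Dict, List, Optional, Any, Tuple
--
-- def get_user_and_bot_messages(messages: List[Dict[str, str]]) -> Tuple[str, str]:
--     """
--     Extract user message and bot response from conversation messages.
--
--     Logic:
--         - Finds the last user message in the conversation
--         - Finds the first bot message that comes after the user message
--         - If no clear pairing exists, takes last user message and last bot message
--
--     Args:
--         messages: List of message dictionaries with 'from' and 'text'
--
--     Returns:
--         Tuple of (user_message, bot_message)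
--     """
--     if not messages:
--         return ('', '')
--
--     user_messages = []
--     bot_messages = []
--
--     # Separate messages by type
--     for i, msg in enumerate(messages):
--         msg_from = msg.get('from', '').lower()
--         msg_text = msg.get('text', '')
--
--         if msg_from == 'user':
--             user_messages.append({'index': i, 'text': msg_text})
--         elif msg_from in ['bot', 'assistant', 'system']:
--             bot_messages.append({'index': i, 'text': msg_text})
--
--     # If no messages found
--     if not user_messages and not bot_messages:
--         return ('', '')
--
--     if not user_messages:
--         # Only bot messages exist
--         return ('', bot_messages[-1]['text'])
--
--     if not bot_messages:
--         # Only user messages exist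
--         return (user_messages[-1]['text'], '')
--
--     # Try to find the last user message and its corresponding bot response
--     last_user = user_messages[-1]
--
--     # Find first bot message after the last user message
--     bot_response = None
--     for bot_msg in bot_messages:
--         if bot_msg['index'] > last_user['index']:
--             bot_response = bot_msg['text']
--             break
--
--     # If no bot response after user message, take the last bot message
--     if bot_response is None:
--         bot_response = bot_messages[-1]['text']
--
--     return (last_user['text'], bot_response)
-- ===== SOURCE B (Python) =====
-- def get_user_and_bot_messages(messages):
--     last_user = None
--     last_bot = None
--     first_bot_after = None
--     for msg in messages:
--         role = msg.get('from', '').lower()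
--         if role == 'user':
--             last_user = msg.get('text', '')
--             first_bot_after = None
--         elif role in ('bot', 'assistant', 'system'):
--             text = msg.get('text', '')
--             last_bot = text
--             if last_user is not None and first_bot_after is None:
--                 first_bot_after = text
--     if last_user is None and last_bot is None:
--         return ('', '')
--     if last_user is None:
--         return ('', last_bot)
--     if last_bot is None:
--         return (last_user, '')
--     return (last_user, first_bot_after if first_bot_after is not None else last_bot)
-- ===== Notes on version B (the rewrite author's own statement) =====
-- stated objective: simpler
-- what changed: Replaced A's two-phase approach (build indexed user/bot message lists, then scan the bot list for the first index after the last user) by a single forward pass keeping only three scalars: last user text, last bot text, and first bot text since the most recent user.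
import Mathlib
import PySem

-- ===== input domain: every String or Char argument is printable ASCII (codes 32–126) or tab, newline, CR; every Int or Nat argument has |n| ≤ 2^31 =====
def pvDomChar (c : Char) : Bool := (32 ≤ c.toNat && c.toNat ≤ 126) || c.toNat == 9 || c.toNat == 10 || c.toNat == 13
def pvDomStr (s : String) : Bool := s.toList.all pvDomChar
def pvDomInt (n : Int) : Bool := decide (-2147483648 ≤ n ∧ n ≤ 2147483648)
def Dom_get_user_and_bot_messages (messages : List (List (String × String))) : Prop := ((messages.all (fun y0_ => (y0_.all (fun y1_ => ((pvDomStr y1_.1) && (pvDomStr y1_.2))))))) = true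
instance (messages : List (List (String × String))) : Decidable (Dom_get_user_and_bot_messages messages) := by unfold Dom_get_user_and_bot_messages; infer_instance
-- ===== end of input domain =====

-- B replaces A's two-phase build-indexed-lists-then-scan by one O(1)-space forward pass (objective: simpler).

-- ===== PORT A =====
-- msg.get(k, '') on the association-list dict
def pvGetS (msg : List (String × String)) (k : String) : String :=
  PySem.Dict.getD (PySem.Dict.mk msg) k ""

-- integer comparison as a Bool (shared predicate shape for find?)
def pvLtB (a b : Int) : Bool := decide (a < b)

-- the classification loop: builds user_messages and bot_messages as (index, text) pairs
def aStep (acc : List (Int × String) × List (Int × String)) (p : Int × List (String × String)) :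
    List (Int × String) × List (Int × String) :=
  let mfrom := PySem.Str.lower (pvGetS p.2 "from")
  let mtext := pvGetS p.2 "text"
  if mfrom = "user" then (acc.1 ++ [(p.1, mtext)], acc.2)
  else if mfrom = "bot" ∨ mfrom = "assistant" ∨ mfrom = "system" then (acc.1, acc.2 ++ [(p.1, mtext)])
  else acc

def get_user_and_bot_messages (messages : List (List (String × String))) : String × String :=
  if messages = [] then ("", "")
  else
    let ub := (PySem.List.enumerate messages 0).foldl aStep ([], [])
    let us := ub.1
    let bs := ub.2
    if us = [] ∧ bs = [] then ("", "")
    else if us = [] then ("", ((bs.getLast?).getD (0, "")).2)      -- bs[-1], guarded nonempty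
    else if bs = [] then (((us.getLast?).getD (0, "")).2, "")      -- us[-1], guarded nonempty
    else
      let last_user := (us.getLast?).getD (0, "")                  -- us[-1], guarded nonempty
      -- 'for bot_msg in bot_messages: if index > last_user.index: take it and break'
      let bot_response : String :=
        match bs.find? (fun b => pvLtB last_user.1 b.1) with
        | some b => b.2
        | none => ((bs.getLast?).getD (0, "")).2                   -- bs[-1], guarded nonempty
      (last_user.2, bot_response)

-- ===== PORT B =====
-- state: (last_user, (last_bot, first_bot_after))
def bStep (st : Option String × Option String × Option String) (msg : List (String × String)) :
    Option String × Option String × Option String :=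
  let role := PySem.Str.lower (pvGetS msg "from")
  if role = "user" then (some (pvGetS msg "text"), st.2.1, none)
  else if role = "bot" ∨ role = "assistant" ∨ role = "system" then
    let t := pvGetS msg "text"
    (st.1, some t, if st.1.isSome ∧ st.2.2 = none then some t else st.2.2)
  else st

-- the final four-case return
def bFinish (st : Option String × Option String × Option String) : String × String :=
  match st with
  | (none, none, _) => ("", "")
  | (none, some b, _) => ("", b)
  | (some u, none, _) => (u, "")
  | (some u, some b, fba) => (u, fba.getD b)

def get_user_and_bot_messages_alt (messages : List (List (String × String))) : String × String :=
  bFinish (messages.foldl bStep (none, none, none))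

-- ===== PRECONDITION & SPEC =====
def Spec_get_user_and_bot_messages (messages : List (List (String × String))) (out : String × String) : Prop := out = get_user_and_bot_messages_alt messages
instance (messages : List (List (String × String))) (out : String × String) : Decidable (Spec_get_user_and_bot_messages messages out) := by unfold Spec_get_user_and_bot_messages; infer_instance

-- ===== CLAIM (what is proved, stated in full; the proofs are below) =====
def Claim_equal_get_user_and_bot_messages : Prop := ∀ (messages : List (List (String × String))), Dom_get_user_and_bot_messages messages → Spec_get_user_and_bot_messages messages (get_user_and_bot_messages messages)

-- ===== LEMMAS AND PROOFS =====

-- the invariant tying A's accumulated (user_messages, bot_messages) to B's three scalars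
def pvInv (us bs : List (Int × String)) (st : Option String × Option String × Option String)
    (i : Int) : Prop :=
  st.1 = (us.getLast?).map (·.2) ∧
  st.2.1 = (bs.getLast?).map (·.2) ∧
  st.2.2 = (us.getLast? >>= fun u => (bs.find? (fun b => pvLtB u.1 b.1)).map (·.2)) ∧
  (∀ p ∈ us, p.1 < i) ∧ (∀ p ∈ bs, p.1 < i)

lemma pvInv_step (us bs : List (Int × String)) (st : Option String × Option String × Option String)
    (i : Int) (msg : List (String × String)) (h : pvInv us bs st i) :
    pvInv (aStep (us, bs) (i, msg)).1 (aStep (us, bs) (i, msg)).2 (bStep st msg) (i + 1) := by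
  obtain ⟨h1, h2, h3, h4, h5⟩ := h
  simp only [aStep, bStep, pvGetS]
  by_cases hu : PySem.Str.lower (PySem.Dict.getD (PySem.Dict.mk msg) "from" "") = "user"
  · -- user message
    simp only [if_pos hu]
    refine ⟨?_, ?_, ?_, ?_, ?_⟩
    · simp
    · simpa using h2
    · have hbs_find : bs.find? (fun b => pvLtB (i : Int) b.1) = none := by
        rw [List.find?_eq_none]
        intro p hp
        have := h5 p hp
        simp only [pvLtB, decide_eq_true_eq]
        omega
      simp [hbs_find]
    · intro p hp
      rcases List.mem_append.1 hp with h' | h'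
      · have := h4 p h'; omega
      · simp only [List.mem_singleton] at h'
        subst h'
        simp only
        omega
    · intro p hp; have := h5 p hp; omega
  · simp only [if_neg hu]
    by_cases hb : PySem.Str.lower (PySem.Dict.getD (PySem.Dict.mk msg) "from" "") = "bot" ∨
        PySem.Str.lower (PySem.Dict.getD (PySem.Dict.mk msg) "from" "") = "assistant" ∨
        PySem.Str.lower (PySem.Dict.getD (PySem.Dict.mk msg) "from" "") = "system"
    · -- bot/assistant/system message
      simp only [if_pos hb]
      refine ⟨by simpa using h1, by simp, ?_, ?_, ?_⟩
      · cases hul : us.getLast? with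
        | none =>
          have hst1 : st.1 = none := by rw [h1, hul]; rfl
          have hst3 : st.2.2 = none := by rw [h3, hul]; rfl
          simp [hst1, hst3]
        | some u =>
          have hu_mem := List.mem_of_getLast? hul
          have hui : u.1 < i := h4 u hu_mem
          have hst1 : st.1 = some u.2 := by rw [h1, hul]; rfl
          have hfind : (bs ++ [(i, PySem.Dict.getD (PySem.Dict.mk msg) "text" "")]).find?
              (fun b => pvLtB u.1 b.1) =
              ((bs.find? (fun b => pvLtB u.1 b.1)).or
                (some (i, PySem.Dict.getD (PySem.Dict.mk msg) "text" ""))) := by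
            rw [List.find?_append]
            congr 1
            simp [pvLtB, hui]
          cases hbf : bs.find? (fun x => pvLtB u.1 x.1) with
          | none =>
            have hst3 : st.2.2 = none := by rw [h3, hul]; simp [hbf]
            have hti : pvLtB u.1 i = true := by simp only [pvLtB, decide_eq_true_eq]; omega
            simp [hst1, hst3, hbf, hti]
          | some b =>
            have hst3 : st.2.2 = some b.2 := by rw [h3, hul]; simp [hbf]
            simp [hst1, hst3, hbf]
      · intro p hp; have := h4 p hp; omega
      · intro p hp
        rcases List.mem_append.1 hp with h' | h'
        · have := h5 p h'; omega
        · simp only [List.mem_singleton] at h'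
          subst h'
          simp only
          omega
    · -- other message: state unchanged
      simp only [if_neg hb]
      exact ⟨h1, h2, h3, fun p hp => by have := h4 p hp; omega,
        fun p hp => by have := h5 p hp; omega⟩

lemma pvInv_fold (msgs : List (List (String × String))) :
    ∀ (us bs : List (Int × String)) (st : Option String × Option String × Option String) (i : Int),
    pvInv us bs st i →
    pvInv ((PySem.List.enumerate msgs i).foldl aStep (us, bs)).1
          ((PySem.List.enumerate msgs i).foldl aStep (us, bs)).2
          (msgs.foldl bStep st) (i + msgs.length) := by
  induction msgs with
  | nil => intro us bs st i h; simpa [PySem.List.enumerate] using h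
  | cons m ms ih =>
    intro us bs st i h
    rw [PySem.List.enumerate_cons]
    have h' := pvInv_step us bs st i m h
    have := ih (aStep (us, bs) (i, m)).1 (aStep (us, bs) (i, m)).2 (bStep st m) (i + 1) h'
    simpa [List.foldl_cons, add_comm, add_left_comm, add_assoc] using this

lemma pv_select (us bs : List (Int × String)) (st : Option String × Option String × Option String)
    (i : Int) (h : pvInv us bs st i) :
    (if us = [] ∧ bs = [] then (("" : String), ("" : String))
     else if us = [] then ("", ((bs.getLast?).getD (0, "")).2)
     else if bs = [] then (((us.getLast?).getD (0, "")).2, "")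
     else
       (((us.getLast?).getD (0, "")).2,
         match bs.find? (fun b => pvLtB ((us.getLast?).getD (0, "")).1 b.1) with
         | some b => b.2
         | none => ((bs.getLast?).getD (0, "")).2)) = bFinish st := by
  obtain ⟨h1, h2, h3, _, _⟩ := h
  obtain ⟨a, b, c⟩ := st
  simp only at h1 h2 h3
  subst h1; subst h2; subst h3
  cases hul : us.getLast? with
  | none =>
    have hus : us = [] := List.getLast?_eq_none_iff.mp hul
    cases hbl : bs.getLast? with
    | none =>
      have hbs : bs = [] := List.getLast?_eq_none_iff.mp hbl
      simp [hus, hbs, bFinish]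
    | some lb =>
      have hbs : bs ≠ [] := by intro e; rw [e] at hbl; simp at hbl
      simp [hus, hbs, bFinish]
  | some lu =>
    have hus : us ≠ [] := by intro e; rw [e] at hul; simp at hul
    simp only [Option.getD_some]
    cases hbl : bs.getLast? with
    | none =>
      have hbs : bs = [] := List.getLast?_eq_none_iff.mp hbl
      simp [hus, hbs, bFinish]
    | some lb =>
      have hbs : bs ≠ [] := by intro e; rw [e] at hbl; simp at hbl
      simp only [hus, hbs, false_and, ite_false]
      split
      · next fb hbf => simp [hbf, bFinish]
      · next hbf => simp [hbf, bFinish]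

-- ===== VERDICT (by name: the statement is the Claim_ definition above) =====
theorem get_user_and_bot_messages_spec : Claim_equal_get_user_and_bot_messages := by
  intro messages _
  unfold Spec_get_user_and_bot_messages get_user_and_bot_messages get_user_and_bot_messages_alt
  cases messages with
  | nil => rfl
  | cons m ms =>
    have hinv := pvInv_fold (m :: ms) [] [] (none, none, none) 0 (by simp [pvInv])
    have hsel := pv_select _ _ _ _ hinv
    simp only [if_neg (List.cons_ne_nil m ms)]
    exact hsel
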